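/-
  THE HEAP AS A CLIENT SEES IT: what every function that allocates, frees, or copies into a new object needs besides the heap's
  own contracts (proofs.shared ProgX/Spec/Heap.lean, Asan/Heap.lean).

      Heap.next_push             `(H.push n c).next = H.next + 64 + c`: THE rewrite rule that makes the next object's address linear
                                 for `omega` (keep `r16 24` unreduced: `e32 : r16 24 = 32 := by decide`)
      HeapOK.fits_of_push        `HeapOK (H.push n c) mem → H.Fits c`: a segment that starts AFTER an allocation gets the room back
      Heap.Fits.next_le          `H.Fits c → H.next + c + 32 ≤ H.limit` (no `HeapOK` of that heap needed)
      HeapPre.next_range         `0x800040 ≤ H.next ∧ H.next ≤ 0xC00020` from a function's `HeapPre`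
      Heap.Live.range            `0x800040 ≤ p ∧ p + n + 32 ≤ 0xC00000` for a live object `(p, n)`: what makes the walker resolve a load
                                 AFTER a push (the stack slot lies below 800000H) and prune the `je` arm of a NULL test on the pointer
      HeapPre.at_push            `HeapPre` at a callee's entry from a SEGMENT's facts: the present heap's `HeapInv` at the present
                                 stack pointer, `SameRegion`, the function's own `HeapPre` at its entry, the `call`'s push: ONE store,
                                 the stack pointer 8 below `top`, the SAME frame list. (A protected function at heap level — the own
                                 frame in front of the list, stores into own locals before the call, any stack pointer below `top`:
                                 `HeapPre.at_call`, FrameCarry.lean §5)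
      LiveIn.below_next          a range live at the heap `H` ends at or below `H.next` or lies beyond the region: it meets NO object
                                 allocated later (the no-overlap clause of `memcpy` into an object this function allocated)
      HeapInv.sameExcept_stack_live
                                 a callee (or your own checked stores) that wrote stack below `sp` and bytes of ONE live object
                                 keeps `HeapInv` (with `hs` = the callee's `w_same`, or `hs := by u_same` for your own stores)
      Heap.Grew.release_new      freeing an object allocated since `H` keeps `H.Grew` (the arm "second allocation failed, the
                                 first is freed again")
-/
import Gif.Spec.Carry
namespace Gif.Spec
open X86 X86.User Asan ProgX.Base ProgX.Base.Spec

/-- **Where the next object of a heap with one more object is**: `64 + c` bytes further (the chunk of the pushed object: its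
capacity and two red zones). `omega` does not look into `H.next`: this is the rewrite rule. -/
theorem _root_.Asan.Heap.next_push (H : Heap) (n c : Nat) : (H.push n c).next = H.next + 64 + c := by
  rw [Heap.next_def, Heap.next_def, Heap.push_base, Heap.push_used]
  omega

/-- **The heap had room for the object it has**: the invariant of `H.push n c` says the chunk of the new object ends inside the region. -/
theorem _root_.Asan.HeapOK.fits_of_push {H : Heap} {n c : Nat} {mem : Mem} (h : HeapOK (H.push n c) mem) : H.Fits c := by
  have hroom := h.room
  rw [Heap.push_base, Heap.push_used, Heap.push_limit] at hroom
  unfold Heap.Fits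
  omega

/-- **Where a fitting object ends**: its chunk (capacity and right red zone) ends inside the region. -/
theorem _root_.Asan.Heap.Fits.next_le {H : Heap} {c : Nat} (h : H.Fits c) : H.next + c + 32 ≤ H.limit := by
  unfold Heap.Fits at h
  rw [Heap.next_def]
  omega

/-- **A live range of the heap `H` ends at or below the next object, or lies beyond the heap's region**: it lies in a live heap
object (below the next one: `HeapOK.next_above`), in one of the other live objects, or in a stack object (both outside the region:
`HeapInv.restOut`, `HeapInv.stackObj_out`). So it does not meet ANY object allocated later. -/
theorem LiveIn.below_next {H : Heap} {rest : List Obj} {frames : List (Nat × FrameLayout)} {top : Nat} {mem : Mem} {a k : Nat}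
    (h : LiveIn (H.liveObjs ++ rest) frames a k) (hinv : HeapInv H rest frames top mem) :
    a + k ≤ H.next ∨ H.limit ≤ a := by
  have hroom := hinv.heap.room
  obtain ⟨o, ho, k1, k2⟩ := h
  rcases List.mem_append.mp ho with hs | hoth
  · -- a stack object
    rcases hinv.stackObj_out hs with hlo | hhi
    · left
      rw [Heap.next_def]
      omega
    · right
      omega
  · rcases List.mem_append.mp hoth with hheap | hr
    · -- a live heap object
      obtain ⟨o', ho', _, e⟩ := Heap.mem_liveObjs.mp hheap
      have hab := hinv.heap.next_above ho'
      have hsc := hinv.heap.size_le_cap ho'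
      have e1 : o.base = o'.base := by
        rw [← e]
        rfl
      have e2 : o.size = o'.size := by
        rw [← e]
        rfl
      left
      omega
    · -- one of the other live objects
      rcases hinv.restOut o hr with hlo | hhi
      · left
        rw [Heap.next_def]
        omega
      · right
        omega

/-- **A callee that wrote its stack frame and bytes of ONE live object keeps the heap's invariant** (`memcpy` / `memset` into a live
object): no shadow byte written; the footprint is `F` bytes of stack below `sp ≤ 800000H` and `[a, a + m)` inside the live object
`(p, n)`. -/
theorem _root_.Asan.HeapInv.sameExcept_stack_live {H : Heap} {rest : List Obj} {frames : List (Nat × FrameLayout)} {top : Nat} {mem mem' : Mem}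
    {p n a m sp F : Nat} (h : HeapInv H rest frames top mem) (hbase : H.base = 0x800000) (hun : ShadowUntouched mem mem')
    (hsp : sp ≤ 0x800000) (hl : H.Live p n) (h1 : p ≤ a) (h2 : a + m ≤ p + n)
    (hs : Mem.SameExcept [⟨sp - F, sp⟩, ⟨a, a + m⟩] mem mem') :
    HeapInv H rest frames top mem' := by
  obtain ⟨c, hlc⟩ := hl
  have hsc := h.heap.size_le_cap hlc
  simp only at hsc
  refine h.sameExcept hun hs ?_
  intro w hw
  rcases List.mem_cons.mp hw with rfl | hw
  · -- the stack window lies below the heap's region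
    left
    left
    rw [hbase]
    exact hsp
  · -- the other window lies inside the object
    have e : w = ⟨a, a + m⟩ := List.mem_singleton.mp hw
    subst e
    right
    refine ⟨⟨p, n, c, .live⟩, hlc, h1, ?_⟩
    show a + m ≤ p + c
    omega

/-- **Where the next object lies, from a function's `HeapPre`**: inside the heap's region `[800000H, C00000H)` with its left red
zone. -/
theorem HeapPre.next_range {H : Heap} {rest : List Obj} {frames : List (Nat × FrameLayout)} {u : State}
    (hp : HeapPre H rest frames u) : 0x800040 ≤ H.next ∧ H.next ≤ 0xC00020 := by
  have hroom := hp.inv.heap.room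
  have hbase := hp.base
  have hlimit := hp.limit
  rw [hbase, hlimit] at hroom
  rw [Heap.next_def, hbase]
  omega

/-- **Where a live object of the heap at 800000H lies**: at or above 800040H (behind the control cell and its own left red zone),
and it ends 32 bytes (its right red zone) below C00000H. With these two bounds in the context `u_omega` / `u_resolve` separate the
object from every stack slot (a load of the object's field AFTER a push resolves to the memory before the push), and
`(UInt64.ofNat p).toNat = p ≠ 0` prunes the `je` arm of `test rdi, rdi` on the pointer. `live_base_ge` is the weaker bound that
needs no `H.base`. -/
theorem _root_.Asan.Heap.Live.range {H : Heap} {mem : Mem} {p n : Nat} (hbase : H.base = 0x800000) (hok : HeapOK H mem)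
    (hl : H.Live p n) : 0x800040 ≤ p ∧ p + n + 32 ≤ 0xC00000 := by
  obtain ⟨c, hc⟩ := hl
  have hr := hok.obj_range hc
  have hi := (hok.obj_inside hc).2.2.1
  rw [hbase] at hr
  simp only at hr hi
  omega

/-- **The heap's precondition at a callee's entry, inside a segment** (the `pre_<addr>` goal of a call of `free`, `GifFreeMapObject`,
… from a segment that is not the function's first, or after an earlier callee changed the heap): the segment has the invariant of
the PRESENT heap `Hc` at its present stack pointer `top` (`hinv`: an assertion's `inv`, or the post of the previous callee), `Hc` is
at the place of the entry's heap, the function's own precondition `hp` gives the text clauses; the `call` pushed the return address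
into the 8 bytes below `top` (`hrsp`, `hmem`: the walker's `w_rsp`, `w_mem`; `ha`: `by u_omega`).

    `exact HeapPre.at_push henv.heap hat.region hinv w_rsp w_mem (by u_omega)`

For the function's FIRST call, with the entry's heap and memory, `HeapPre.callee` is the shorter way. For a footprint WINDOW instead
of the one store (spills, stores into locals of the own protected frame before the call: `hs` by `rw [w_mem]; u_same`) use
`HeapPre.at_call` (FrameCarry.lean §5). -/
theorem HeapPre.at_push {H Hc : Heap} {rest : List Obj} {frames : List (Nat × FrameLayout)} {e s : State} {mem : Mem} {top : Nat}
    {a : Word} {x : Nat} (hp : HeapPre H rest frames e) (hr : SameRegion H Hc) (hinv : HeapInv Hc rest frames top mem)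
    (hrsp : s.reg .rsp = a) (hmem : s.mem = mem.writeLE a 8 x) (ha : a.toNat + 8 = top) : HeapPre Hc rest frames s := by
  have hbase : Hc.base = 0x800000 := hr.1.trans hp.base
  have hlimit : Hc.limit = 0xC00000 := hr.2.trans hp.limit
  have htop := hinv.shadow.stack.hi
  have hstore : HeapInv Hc rest frames top (mem.writeLE a 8 x) := by
    apply hinv.writeLE_out a 8 x
    · omega
    · left
      rw [hbase]
      omega
    · left
      omega
  have e_top : (s.reg .rsp).toNat + 8 = top := by
    rw [hrsp]
    exact ha
  refine ⟨?_, hbase, hlimit, hp.text, hp.offText⟩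
  rw [e_top, hmem]
  exact hstore

/-- **`free` of an object allocated since `H` keeps `H.Grew`**: no object of `H` has the base `p` (never re-use:
`HeapOK.next_above`). -/
theorem _root_.Asan.Heap.Grew.release_new {H H' : Heap} {mem : Mem} (hg : H.Grew H') (hok : HeapOK H mem) {p : Nat} (hp : H.next ≤ p) :
    H.Grew (H'.release p) := by
  have hne : ∀ x, x ∈ H.objs → Heap.releaseObj p x = x := by
    intro x hx
    apply releaseObj_of_ne
    have := hok.next_above hx
    omega
  refine ⟨hg.region.trans (SameRegion.release H' p), ?_, ?_, ?_⟩
  · intro x hx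
    rw [Heap.release_objs]
    apply List.mem_map.mpr
    exact ⟨x, hg.old x hx, hne x hx⟩
  · intro y hy
    rw [Heap.release_objs] at hy
    obtain ⟨x, hx, e⟩ := List.mem_map.mp hy
    rcases hg.new x hx with hin | hge
    · left
      rw [← e, hne x hin]
      exact hin
    · right
      rw [← e, releaseObj_base]
      exact hge
  · rw [Heap.release_used]
    exact hg.used

end Gif.Spec
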